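-- pv_equiv track=rewrite | github.com/mbourque/ifx_customizer | ifx_catalog_manager.py | parse_catalog_index_content
-- ===== SOURCE A (Python) =====
-- def parse_catalog_index_content(content: str) -> tuple[list[str], list[tuple[str, str]]]:
--     """Parse ifx_catalogs.txt-style content (e.g. from a string). Returns (display_items, item_sections)."""
--     display_items = []
--     item_sections = []
--     current_section = None
--     for line in content.splitlines():
--         stripped = line.strip()
--         if not stripped:
--             continue
--         if stripped.startswith("#"):
--             current_section = stripped
--             display_items.append(stripped)
--         else:
--             display_items.append(stripped)
--             if current_section:
--                 item_sections.append((stripped, current_section))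
--     return display_items, item_sections
-- ===== SOURCE B (Python) =====
-- def parse_catalog_index_content(content: str) -> tuple[list[str], list[tuple[str, str]]]:
--     """Two-pass: group stripped non-empty lines into (header-or-None, items) sections, then flatten."""
--     lines = [s for s in (line.strip() for line in content.splitlines()) if s]
--     groups = [(None, [])]
--     for s in lines:
--         if s.startswith("#"):
--             groups.append((s, []))
--         else:
--             groups[-1][1].append(s)
--     display_items = []
--     item_sections = []
--     for hdr, items in groups:
--         if hdr is not None:
--             display_items.append(hdr)
--             item_sections.extend((it, hdr) for it in items)
--         display_items.extend(items)
--     return display_items, item_sections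
-- ===== Notes on version B (the rewrite author's own statement) =====
-- stated objective: alternative
-- what changed: B replaces A's single stateful line loop (tracking current_section while emitting both outputs) by a two-pass decomposition: first group the stripped non-empty lines into (header-or-None, items) sections, then derive display_items and item_sections by flattening the grouped structure.
import Mathlib
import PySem

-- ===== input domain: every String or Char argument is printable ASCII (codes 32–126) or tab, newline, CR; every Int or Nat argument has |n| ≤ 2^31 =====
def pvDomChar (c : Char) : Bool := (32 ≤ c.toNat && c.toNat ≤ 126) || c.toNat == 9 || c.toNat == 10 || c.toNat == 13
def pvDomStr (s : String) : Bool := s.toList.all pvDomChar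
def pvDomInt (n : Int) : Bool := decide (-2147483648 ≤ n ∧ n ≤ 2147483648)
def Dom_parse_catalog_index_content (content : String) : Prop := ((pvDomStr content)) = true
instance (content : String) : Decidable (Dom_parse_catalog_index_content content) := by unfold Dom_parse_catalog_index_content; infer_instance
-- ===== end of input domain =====

-- B parses in two passes (group lines into sections, then flatten) instead of A's single stateful loop; alternative decomposition, same cost.


-- ===== PORT A =====
-- one iteration of A's line loop; state = (display_items, item_sections, current_section)
def pvStepA (st : List String × List (String × String) × Option String) (line : String) :
    List String × List (String × String) × Option String :=
  let stripped := PySem.Str.strip line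
  if stripped = "" then st
  else if PySem.Str.startswith stripped "#" then
    (st.1 ++ [stripped], st.2.1, some stripped)
  else
    (st.1 ++ [stripped],
     (match st.2.2 with            -- 'if current_section:' — None and "" are falsy
      | some c => if c = "" then st.2.1 else st.2.1 ++ [(stripped, c)]
      | none => st.2.1),
     st.2.2)

def parse_catalog_index_content (content : String) : List String × (List (String × String)) :=
  let r := (PySem.Str.splitlines content).foldl pvStepA ([], [], none)
  (r.1, r.2.1)

-- ===== PORT B =====
-- groups[-1][1].append(s): append s to the item list of the last group
def pvAppendLast (gs : List (Option String × List String)) (s : String) :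
    List (Option String × List String) :=
  match gs with
  | [] => []
  | [g] => [(g.1, g.2 ++ [s])]
  | g :: g' :: rest => g :: pvAppendLast (g' :: rest) s

-- first pass: extend the grouped structure by one stripped non-empty line
def pvGroupStep (gs : List (Option String × List String)) (s : String) :
    List (Option String × List String) :=
  if PySem.Str.startswith s "#" then gs ++ [(some s, [])] else pvAppendLast gs s

-- second pass: fold one group into (display_items, item_sections)
def pvFlattenStep (acc : List String × List (String × String)) (g : Option String × List String) :
    List String × List (String × String) :=
  match g.1 with
  | some h => (acc.1 ++ h :: g.2, acc.2 ++ g.2.map (fun it => (it, h)))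
  | none => (acc.1 ++ g.2, acc.2)

def parse_catalog_index_content_alt (content : String) : List String × (List (String × String)) :=
  let lines := ((PySem.Str.splitlines content).map PySem.Str.strip).filter (fun s => s ≠ "")
  let groups := lines.foldl pvGroupStep [(none, [])]
  groups.foldl pvFlattenStep ([], [])

-- ===== PRECONDITION & SPEC =====
def Spec_parse_catalog_index_content (content : String) (out : List String × (List (String × String))) : Prop := out = parse_catalog_index_content_alt content
instance (content : String) (out : List String × (List (String × String))) : Decidable (Spec_parse_catalog_index_content content out) := by unfold Spec_parse_catalog_index_content; infer_instance

-- ===== CLAIM (what is proved, stated in full; the proofs are below) =====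
def Claim_equal_parse_catalog_index_content : Prop := ∀ (content : String), Dom_parse_catalog_index_content content → Spec_parse_catalog_index_content content (parse_catalog_index_content content)

-- ===== LEMMAS AND PROOFS =====

-- header of the last group (B's groups list is never empty)
def pvLastHdr : List (Option String × List String) → Option (Option String)
  | [] => none
  | [g] => some g.1
  | _ :: g' :: rest => pvLastHdr (g' :: rest)

theorem pvLastHdr_append (gs : List (Option String × List String)) (g : Option String × List String) :
    pvLastHdr (gs ++ [g]) = some g.1 := by
  induction gs with
  | nil => rfl
  | cons a t ih =>
      cases t with
      | nil => rfl
      | cons b r => simpa [pvLastHdr] using ih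

theorem pvLastHdr_appendLast (gs : List (Option String × List String)) (s : String) :
    pvLastHdr (pvAppendLast gs s) = pvLastHdr gs := by
  induction gs with
  | nil => rfl
  | cons a t ih =>
      cases t with
      | nil => rfl
      | cons b r =>
          cases r with
          | nil => rfl
          | cons c r' => simpa [pvAppendLast, pvLastHdr] using ih

theorem pvAppendLast_ne_nil (gs : List (Option String × List String)) (s : String)
    (h : gs ≠ []) : pvAppendLast gs s ≠ [] := by
  cases gs with
  | nil => exact absurd rfl h
  | cons a t => cases t <;> simp [pvAppendLast]

theorem pvFlatten_appendLast (gs : List (Option String × List String)) (s : String)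
    (acc : List String × List (String × String)) (h : gs ≠ []) :
    (pvAppendLast gs s).foldl pvFlattenStep acc =
      (match pvLastHdr gs with
       | some (some hd) => ((gs.foldl pvFlattenStep acc).1 ++ [s], (gs.foldl pvFlattenStep acc).2 ++ [(s, hd)])
       | some none => ((gs.foldl pvFlattenStep acc).1 ++ [s], (gs.foldl pvFlattenStep acc).2)
       | none => gs.foldl pvFlattenStep acc) := by
  induction gs generalizing acc with
  | nil => exact absurd rfl h
  | cons a t ih =>
      cases t with
      | nil =>
          rcases a with ⟨hd, items⟩
          cases hd <;> simp [pvAppendLast, pvLastHdr, pvFlattenStep]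
      | cons b r =>
          simpa [pvAppendLast, pvLastHdr] using ih (pvFlattenStep acc a) (by simp)

-- truthiness of A's current_section vs B's last group header
def pvHdrOk (cs : Option String) : Prop :=
  match cs with
  | some c => c ≠ ""
  | none => True

theorem pv_main (lines : List String) (gs : List (Option String × List String)) (cs : Option String)
    (hne : gs ≠ []) (hhd : pvLastHdr gs = some cs) (hok : pvHdrOk cs) :
    (((lines.map PySem.Str.strip).filter (fun s => s ≠ "")).foldl pvGroupStep gs).foldl pvFlattenStep ([], []) =
      ((lines.foldl pvStepA ((gs.foldl pvFlattenStep ([], [])).1, (gs.foldl pvFlattenStep ([], [])).2, cs)).1,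
       (lines.foldl pvStepA ((gs.foldl pvFlattenStep ([], [])).1, (gs.foldl pvFlattenStep ([], [])).2, cs)).2.1) := by
  induction lines generalizing gs cs with
  | nil => simp
  | cons line rest ih =>
      by_cases hs : PySem.Str.strip line = ""
      · simpa [hs, pvStepA] using ih gs cs hne hhd hok
      · by_cases hh : PySem.Str.startswith (PySem.Str.strip line) "#" = true
        · have hh' : PySem.Chars.startswith (PySem.Chars.strip line.toList) ['#'] = true := by
            simpa using hh
          have H := ih (gs ++ [(some (PySem.Str.strip line), [])]) (some (PySem.Str.strip line))
            (by simp) (pvLastHdr_append gs _) (by simpa [pvHdrOk] using hs)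
          simpa [hs, hh', pvStepA, pvGroupStep, List.foldl_append, pvFlattenStep] using H
        · have hh' : PySem.Chars.startswith (PySem.Chars.strip line.toList) ['#'] = false := by
            simpa using hh
          have hfl := pvFlatten_appendLast gs (PySem.Str.strip line) ([], []) hne
          have H := ih (pvAppendLast gs (PySem.Str.strip line)) cs
            (pvAppendLast_ne_nil gs _ hne)
            (by rw [pvLastHdr_appendLast]; exact hhd) hok
          rw [hhd] at hfl
          cases cs with
          | none =>
              simpa [hs, hh', pvStepA, pvGroupStep, hfl] using H
          | some c =>
              have hc : c ≠ "" := hok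
              simpa [hs, hh', pvStepA, pvGroupStep, hfl, hc] using H

-- ===== VERDICT (by name: the statement is the Claim_ definition above) =====
theorem parse_catalog_index_content_spec : Claim_equal_parse_catalog_index_content := by
  intro content _
  unfold Spec_parse_catalog_index_content parse_catalog_index_content parse_catalog_index_content_alt
  have := pv_main (PySem.Str.splitlines content) [(none, [])] none (by simp) rfl trivial
  simpa [pvFlattenStep] using this.symm
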